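-- pv_equiv track=rewrite | github.com/fulei345/advent_of_code | 2024/python/day01.py | part2
-- ===== SOURCE A (Python) =====
-- def part2(input):
--     liste = input.splitlines()
--
--     rightcol = []
--     leftcol = []
--     for l in liste:
--         lol = l.split()
--         leftcol.append(lol[0])
--         rightcol.append(lol[1])
--
--     dict = {}
--     for s in rightcol:
--         if s not in dict:
--             dict[s] = 1
--         else:
--             dict[s] += 1
--
--     result = 0
--     for num in leftcol:
--         if num in dict:
--             result += int(num) * dict[num]
--
--     return result
-- ===== SOURCE B (Python) =====
-- def part2(input):
--     lines = input.splitlines()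
--     result = 0
--     for l in lines:
--         left = l.split()[0]
--         for m in lines:
--             if left == m.split()[1]:
--                 result += int(left)
--     return result
-- ===== Notes on version B (the rewrite author's own statement) =====
-- stated objective: alternative
-- what changed: B drops A's frequency-dictionary entirely: it has no count structure at all, instead summing over matched (left,right) pairs with a nested loop over lines, adding int(left) once for every right-column entry equal to it.
import Mathlib
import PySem

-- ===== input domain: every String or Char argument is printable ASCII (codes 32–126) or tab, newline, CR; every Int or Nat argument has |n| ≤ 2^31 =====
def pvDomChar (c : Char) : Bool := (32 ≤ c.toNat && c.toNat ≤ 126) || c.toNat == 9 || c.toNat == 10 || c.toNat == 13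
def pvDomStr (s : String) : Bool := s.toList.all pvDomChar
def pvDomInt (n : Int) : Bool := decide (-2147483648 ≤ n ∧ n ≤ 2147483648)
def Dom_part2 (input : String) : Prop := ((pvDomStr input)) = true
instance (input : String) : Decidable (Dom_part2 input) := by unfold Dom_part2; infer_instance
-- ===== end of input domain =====

-- B has no frequency structure at all: it sums over matched (left,right) pairs with a
-- nested loop over lines, adding int(left) once per matching right entry (alternative,
-- not faster).

-- ===== PORT A =====
-- int(num): PySem.Int.ofStr? is none exactly where Python raises ValueError; Pre_ excludes
-- those inputs, so the total `.getD 0` form is exact on Pre_. Likewise pyGetD with default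
-- "" is exact where Pre_ guarantees the index is in range.
def part2 (input : String) : Int :=
  let liste := PySem.Str.splitlines input
  let cols := liste.foldl (fun (acc : List String × List String) l =>
      let lol := PySem.Str.split₀ l
      (acc.1 ++ [PySem.List.pyGetD lol 0 ""], acc.2 ++ [PySem.List.pyGetD lol 1 ""])) ([], [])
  let d := cols.2.foldl (fun (d : PySem.Dict String Int) s =>
      if ¬ d.contains s then d.insert s 1 else d.insert s (d.getD s 0 + 1)) PySem.Dict.empty
  cols.1.foldl (fun result num =>
      if d.contains num then result + (PySem.Int.ofStr? num).getD 0 * d.getD num 0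
      else result) 0

-- ===== PORT B =====
def part2_alt (input : String) : Int :=
  let lines := PySem.Str.splitlines input
  lines.foldl (fun result l =>
      let left := PySem.List.pyGetD (PySem.Str.split₀ l) 0 ""
      lines.foldl (fun r m =>
          if left = PySem.List.pyGetD (PySem.Str.split₀ m) 1 ""
          then r + (PySem.Int.ofStr? left).getD 0 else r) result) 0

-- ===== PRECONDITION & SPEC =====
-- Pre_ excludes exactly the inputs where Python A raises: a line whose split has fewer
-- than two tokens (IndexError), or a left token that occurs in the right column but is
-- not int-parsable (ValueError on int(num)).
def Pre_part2 (input : String) : Prop :=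
  ∀ l ∈ PySem.Str.splitlines input,
    2 ≤ (PySem.Str.split₀ l).length ∧
    (((PySem.Str.split₀ l).getD 0 "") ∈
        (PySem.Str.splitlines input).map (fun l' => (PySem.Str.split₀ l').getD 1 "") →
      (PySem.Int.ofStr? ((PySem.Str.split₀ l).getD 0 "")).isSome)
instance (input : String) : Decidable (Pre_part2 input) := by unfold Pre_part2; infer_instance
def pvWitness_part2 : String := "3 4\n4 3\n2 5\n1 3\n3 9\n3 3"
def Spec_part2 (input : String) (out : Int) : Prop := out = part2_alt input
instance (input : String) (out : Int) : Decidable (Spec_part2 input out) := by unfold Spec_part2; infer_instance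

-- ===== CLAIM (what is proved, stated in full; the proofs are below) =====
def Claim_equal_part2 : Prop := ∀ (input : String), Dom_part2 input → Pre_part2 input → Spec_part2 input (part2 input)

-- ===== LEMMAS AND PROOFS =====

-- A's column-building loop produces the two column maps.
theorem pv_cols_eq (ls : List String) (a b : List String) :
    ls.foldl (fun (acc : List String × List String) l =>
      let lol := PySem.Str.split₀ l
      (acc.1 ++ [PySem.List.pyGetD lol 0 ""], acc.2 ++ [PySem.List.pyGetD lol 1 ""])) (a, b)
    = (a ++ ls.map (fun l => PySem.List.pyGetD (PySem.Str.split₀ l) 0 ""),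
       b ++ ls.map (fun l => PySem.List.pyGetD (PySem.Str.split₀ l) 1 "")) := by
  induction ls generalizing a b with
  | nil => simp
  | cons x xs ih => simp [List.foldl_cons, ih]

-- A's dict-building loop is Counter.
theorem pv_dict_eq_counter (rc : List String) :
    rc.foldl (fun (d : PySem.Dict String Int) s =>
      if ¬ d.contains s then d.insert s 1 else d.insert s (d.getD s 0 + 1)) PySem.Dict.empty
    = PySem.Dict.counter rc := by
  rw [PySem.Dict.counter_eq_foldl]
  have hf : (fun (d : PySem.Dict String Int) s =>
      if ¬ d.contains s then d.insert s 1 else d.insert s (d.getD s 0 + 1))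
      = fun (d : PySem.Dict String Int) x => d.modify x 0 (· + 1) := by
    funext d s
    by_cases h : d.contains s
    · simp [h, PySem.Dict.modify, PySem.Dict.getD_eq_get?_getD]
    · have h0 : d.getD s 0 = 0 :=
        PySem.Dict.getD_of_not_contains d 0 (by simpa using h)
      simp [h, h0, PySem.Dict.modify]
  rw [hf]

-- B's inner pair-matching loop adds v once per match.
theorem pv_inner_fold (ls : List String) (p : String → Prop) [DecidablePred p]
    (v r : Int) :
    ls.foldl (fun r m => if p m then r + v else r) r
      = r + v * (ls.countP (fun m => decide (p m)) : Int) := by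
  induction ls generalizing r with
  | nil => simp
  | cons x xs ih =>
    by_cases h : p x <;> simp [List.foldl_cons, ih, List.countP_cons, h] <;> ring

-- ===== VERDICT (by name: the statement is the Claim_ definition above) =====
theorem part2_spec : Claim_equal_part2 := by
  intro input _ _
  unfold Spec_part2
  simp only [part2, part2_alt]
  rw [pv_cols_eq, List.nil_append, List.nil_append, pv_dict_eq_counter, List.foldl_map]
  congr 1
  funext r l
  rw [pv_inner_fold]
  set left := PySem.List.pyGetD (PySem.Str.split₀ l) 0 "" with hleft
  have hcnt : ((PySem.Str.splitlines input).countP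
        (fun m => decide (left = PySem.List.pyGetD (PySem.Str.split₀ m) 1 "")) : Int)
      = ((List.map (fun l' => PySem.List.pyGetD (PySem.Str.split₀ l') 1 "")
          (PySem.Str.splitlines input)).count left : Int) := by
    congr 1
    rw [List.count_eq_countP, List.countP_map]
    refine List.countP_congr (fun m _ => ?_)
    by_cases h : left = PySem.List.pyGetD (PySem.Str.split₀ m) 1 ""
    · simp [Function.comp_apply, h]
    · simp [Function.comp_apply, h, Ne.symm h]
  rw [hcnt]
  by_cases hm : left ∈
      List.map (fun l' => PySem.List.pyGetD (PySem.Str.split₀ l') 1 "") (PySem.Str.splitlines input)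
  · simp [PySem.Dict.contains_counter, PySem.Dict.getD_counter, hm]
  · simp [PySem.Dict.contains_counter, hm, List.count_eq_zero.mpr hm]
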